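-- pv_equiv track=rewrite | github.com/samuelthomaz7/fully_convolutional_network_mtsc | utils_file.py | closest_power_of_2
-- ===== SOURCE A (Python) =====
-- def closest_power_of_2(n):
--     if n < 1:
--         return 1
--
--     # Find the next higher power of 2 greater than or equal to n
--     upper_power = 1
--     while upper_power < n:
--         upper_power *= 2
--
--     # Find the previous lower power of 2 less than or equal to n
--     lower_power = upper_power // 2
--
--     # Check which of the two is closer to n
--     if abs(n - lower_power) < abs(upper_power - n):
--         return lower_power
--     else:
--         return upper_power
-- ===== SOURCE B (Python) =====
-- def closest_power_of_2(n):
--     if n < 1: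
--         return 1
--     upper = 1 << (n - 1).bit_length()
--     lower = upper >> 1
--     return lower if abs(n - lower) < abs(upper - n) else upper
-- ===== Notes on version B (the rewrite author's own statement) =====
-- stated objective: idiomatic
-- what changed: Replaced the doubling while-loop with a closed-form bit-length computation (upper = 1 << (n - 1).bit_length()), keeping the identical tie-break comparison.
import Mathlib
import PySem

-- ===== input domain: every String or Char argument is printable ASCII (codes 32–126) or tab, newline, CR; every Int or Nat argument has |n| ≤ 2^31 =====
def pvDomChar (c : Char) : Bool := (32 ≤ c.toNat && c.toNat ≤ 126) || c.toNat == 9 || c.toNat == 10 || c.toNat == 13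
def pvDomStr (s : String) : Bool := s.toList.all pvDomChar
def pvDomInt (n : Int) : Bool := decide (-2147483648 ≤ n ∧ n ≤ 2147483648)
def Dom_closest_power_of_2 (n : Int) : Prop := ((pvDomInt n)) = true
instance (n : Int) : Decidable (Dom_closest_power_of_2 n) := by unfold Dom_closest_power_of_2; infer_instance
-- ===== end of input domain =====

-- B replaces A's doubling while-loop by a closed-form bit-length computation
-- (upper = 1 << (n-1).bit_length()), keeping the identical tie-break comparison.

-- ===== PORT A =====
-- A's 'while upper_power < n: upper_power *= 2' loop; the '0 < u' conjunct is a
-- totality guard only (every actual call starts at u = 1, where it always holds).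
def powLoopA (n u : Int) : Int :=
  if _h : u < n ∧ 0 < u then powLoopA n (u * 2) else u
termination_by (n - u).toNat
decreasing_by omega

def closest_power_of_2 (n : Int) : Int :=
  if n < 1 then 1
  else
    let upper := powLoopA n 1
    let lower := PySem.Int.floordiv upper 2
    if |n - lower| < |upper - n| then lower else upper

-- ===== PORT B =====
def closest_power_of_2_alt (n : Int) : Int :=
  if n < 1 then 1
  else
    let upper : Int := 1 <<< PySem.Int.bitLength (n - 1)
    let lower := upper >>> 1
    if |n - lower| < |upper - n| then lower else upper

-- ===== PRECONDITION & SPEC =====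
def Spec_closest_power_of_2 (n : Int) (out : Int) : Prop := out = closest_power_of_2_alt n
instance (n : Int) (out : Int) : Decidable (Spec_closest_power_of_2 n out) := by unfold Spec_closest_power_of_2; infer_instance

-- ===== CLAIM (what is proved, stated in full; the proofs are below) =====
def Claim_equal_closest_power_of_2 : Prop := ∀ (n : Int), Dom_closest_power_of_2 n → Spec_closest_power_of_2 n (closest_power_of_2 n)

-- ===== LEMMAS AND PROOFS =====

-- A's loop started at 2^k returns 2^(bitLength m) on input n = m + 1, for k ≤ bitLength m.
lemma powLoopA_pow (m : Nat) : ∀ (d k : Nat), PySem.Int.bitLength (m : Int) - k = d →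
    k ≤ PySem.Int.bitLength (m : Int) →
    powLoopA ((m : Int) + 1) ((2 ^ k : Nat) : Int) =
      ((2 ^ PySem.Int.bitLength (m : Int) : Nat) : Int) := by
  intro d
  induction d with
  | zero =>
    intro k hd hk
    have hks : k = PySem.Int.bitLength (m : Int) := by omega
    subst hks
    have hm : m < 2 ^ PySem.Int.bitLength (m : Int) := by
      have := PySem.Int.lt_two_pow_bitLength (m : Int)
      simpa using this
    rw [powLoopA]
    rw [dif_neg]
    push Not
    intro hlt
    exfalso
    have : ((m : Int) + 1) ≤ ((2 ^ PySem.Int.bitLength (m : Int) : Nat) : Int) := by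
      exact_mod_cast Int.ofNat_le.mpr hm
    omega
  | succ d ih =>
    intro k hd hk
    have hks : k < PySem.Int.bitLength (m : Int) := by omega
    have hm0 : (m : Int) ≠ 0 := by
      intro h
      have : m = 0 := by exact_mod_cast h
      subst this
      simp [PySem.Int.bitLength_zero] at hks
    have hle : 2 ^ k ≤ m := by
      have h1 := PySem.Int.two_pow_bitLength_le (m : Int) hm0
      have h2 : (2:Nat) ^ k ≤ 2 ^ (PySem.Int.bitLength (m : Int) - 1) :=
        Nat.pow_le_pow_right (by omega) (by omega)
      have h3 : ((m : Int)).natAbs = m := by simp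
      omega
    rw [powLoopA]
    rw [dif_pos]
    · have hcast : ((2 ^ k : Nat) : Int) * 2 = ((2 ^ (k + 1) : Nat) : Int) := by
        push_cast; ring
      rw [hcast]
      exact ih (k + 1) (by omega) (by omega)
    · constructor
      · have : ((2 ^ k : Nat) : Int) ≤ (m : Int) := by exact_mod_cast hle
        omega
      · positivity

lemma powLoopA_one (n : Int) (hn : 1 ≤ n) :
    powLoopA n 1 = ((2 ^ PySem.Int.bitLength (n - 1) : Nat) : Int) := by
  have hm : n = ((n - 1).toNat : Int) + 1 := by omega
  have h := powLoopA_pow (n - 1).toNat (PySem.Int.bitLength ((n - 1).toNat : Int)) 0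
    (by omega) (Nat.zero_le _)
  rw [hm]
  have h1 : (((n - 1).toNat : Int)) = n - 1 := by omega
  simpa [h1] using h

lemma shiftr_natCast (p : Nat) : ((p : Int)) >>> 1 = ((p >>> 1 : Nat) : Int) := rfl

-- ===== VERDICT (by name: the statement is the Claim_ definition above) =====
theorem closest_power_of_2_spec : Claim_equal_closest_power_of_2 := by
  intro n _
  unfold Spec_closest_power_of_2 closest_power_of_2 closest_power_of_2_alt
  by_cases hn : n < 1
  · simp [hn]
  · have hn1 : 1 ≤ n := by omega
    rw [if_neg hn, if_neg hn]
    rw [powLoopA_one n hn1]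
    simp only [Nat.one_shiftLeft]
    rw [shiftr_natCast]
    have hfd : PySem.Int.floordiv ((2 ^ PySem.Int.bitLength (n - 1) : Nat) : Int) 2 =
        ((2 ^ PySem.Int.bitLength (n - 1) / 2 : Nat) : Int) := by
      exact_mod_cast PySem.Int.floordiv_natCast _ 2
    rw [hfd, Nat.shiftRight_eq_div_pow, pow_one]
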